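-- pv_equiv track=rewrite | github.com/thommackey/cordfeeder | cordfeeder/parser.py | _strip_boilerplate
-- ===== SOURCE A (Python) =====
-- _BOILERPLATE_MIN_LEN = 20
--
-- def _strip_boilerplate(summaries: list[str]) -> list[str]:
--     """Remove common prefix/suffix boilerplate shared across most summaries.
--
--     If a supermajority (>=80%) of summaries share a long (>=20 char) prefix
--     or suffix, it's almost certainly newsletter boilerplate.  Strip it at a
--     word boundary.  Entries that don't match the detected boilerplate are
--     left unchanged.
--     """
--     if len(summaries) < 2:
--         return summaries
--
--     # --- common prefix ---
--     prefix = _majority_common_prefix(summaries)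
--     if len(prefix) >= _BOILERPLATE_MIN_LEN:
--         cut = len(prefix)
--         summaries = [
--             s[cut:].lstrip() if s.startswith(prefix) else s
--             for s in summaries
--         ]
--
--     # --- common suffix ---
--     suffix = _majority_common_suffix(summaries)
--     if len(suffix) >= _BOILERPLATE_MIN_LEN:
--         summaries = [
--             s[: -len(suffix)].rstrip() if s.endswith(suffix) else s
--             for s in summaries
--         ]
--
--     return summaries
--
-- _SUPERMAJORITY = 0.8
--
-- def _majority_common_prefix(strings: list[str]) -> str:
--     """Find the longest prefix shared by >=80% of strings, at a word boundary."""
--     if not strings: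
--         return ""
--     threshold = max(2, int(len(strings) * _SUPERMAJORITY))
--
--     # Start with the full text of the shortest string as candidate,
--     # then shrink character-by-character until enough strings match.
--     candidate = min(strings, key=len)
--     while candidate:
--         matches = sum(1 for s in strings if s.startswith(candidate))
--         if matches >= threshold:
--             break
--         candidate = candidate[:-1]
--
--     if not candidate:
--         return ""
--     # Snap back to last space to avoid partial words
--     last_space = candidate.rfind(" ")
--     return candidate[: last_space + 1] if last_space >= 0 else ""
--
-- def _majority_common_suffix(strings: list[str]) -> str:
--     """Find the longest suffix shared by >=80% of strings, at a word boundary."""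
--     if not strings:
--         return ""
--     threshold = max(2, int(len(strings) * _SUPERMAJORITY))
--
--     candidate = min(strings, key=len)
--     while candidate:
--         matches = sum(1 for s in strings if s.endswith(candidate))
--         if matches >= threshold:
--             break
--         candidate = candidate[1:]
--
--     if not candidate:
--         return ""
--     # Snap forward to first space to avoid partial words
--     first_space = candidate.find(" ")
--     return candidate[first_space + 1 :] if first_space >= 0 else ""
-- ===== SOURCE B (Python) =====
-- _BOILERPLATE_MIN_LEN = 20
--
--
-- def _lcp_len(s: str, t: str) -> int:
--     """Length of the longest common prefix of s and t."""
--     i = 0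
--     n = min(len(s), len(t))
--     while i < n and s[i] == t[i]:
--         i += 1
--     return i
--
--
-- def _lcs_len(s: str, t: str) -> int:
--     """Length of the longest common suffix of s and t."""
--     return _lcp_len(s[::-1], t[::-1])
--
--
-- def _select_len(lengths: list[int], threshold: int) -> int:
--     """Largest k such that at least `threshold` entries are >= k."""
--     lengths = sorted(lengths)
--     return lengths[len(lengths) - threshold]
--
--
-- def _majority_prefix(summaries: list[str], threshold: int) -> str:
--     m = min(summaries, key=len)
--     k = _select_len([_lcp_len(s, m) for s in summaries], threshold)
--     cand = m[:k]
--     sp = cand.rfind(" ")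
--     return cand[: sp + 1] if sp >= 0 else ""
--
--
-- def _majority_suffix(summaries: list[str], threshold: int) -> str:
--     m = min(summaries, key=len)
--     k = _select_len([_lcs_len(s, m) for s in summaries], threshold)
--     cand = m[len(m) - k :]
--     sp = cand.find(" ")
--     return cand[sp + 1 :] if sp >= 0 else ""
--
--
-- def _strip_boilerplate(summaries: list[str]) -> list[str]:
--     if len(summaries) < 2:
--         return summaries
--     threshold = max(2, int(len(summaries) * 0.8))
--
--     prefix = _majority_prefix(summaries, threshold)
--     if len(prefix) >= _BOILERPLATE_MIN_LEN:
--         summaries = [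
--             s[len(prefix):].lstrip() if s.startswith(prefix) else s
--             for s in summaries
--         ]
--
--     suffix = _majority_suffix(summaries, threshold)
--     if len(suffix) >= _BOILERPLATE_MIN_LEN:
--         summaries = [
--             s[: -len(suffix)].rstrip() if s.endswith(suffix) else s
--             for s in summaries
--         ]
--
--     return summaries
-- ===== Notes on version B (the rewrite author's own statement) =====
-- stated objective: alternative
-- what changed: A repeatedly shrinks a candidate prefix/suffix one character at a time and rescans all strings at each step; B instead computes each string's common-prefix/suffix length with the shortest string in a single pass and selects the threshold-th largest of those lengths via one sort, then snaps at the word boundary.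
import Mathlib
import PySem

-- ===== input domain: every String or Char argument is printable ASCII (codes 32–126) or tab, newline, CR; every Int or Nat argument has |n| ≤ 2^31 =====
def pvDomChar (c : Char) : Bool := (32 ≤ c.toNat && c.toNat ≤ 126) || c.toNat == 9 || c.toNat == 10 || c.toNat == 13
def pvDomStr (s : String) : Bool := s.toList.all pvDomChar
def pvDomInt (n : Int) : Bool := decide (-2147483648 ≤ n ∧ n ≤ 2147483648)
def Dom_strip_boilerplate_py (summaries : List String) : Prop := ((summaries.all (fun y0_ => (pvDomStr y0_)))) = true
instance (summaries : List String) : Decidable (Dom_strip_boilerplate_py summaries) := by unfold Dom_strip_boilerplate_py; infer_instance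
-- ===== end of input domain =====

-- B replaces A's shrink-candidate-and-recount loops by a different algorithm: per-string
-- common prefix/suffix lengths with the shortest string, then a sorted-order selection
-- of the threshold-th largest length (same return value).

-- ===== PORT A =====
-- threshold = max(2, int(len(strings) * 0.8)): for every list length below 2^50 the
-- double rounding of n*0.8 never crosses an integer, so int(n*0.8) = 4*n//5 exactly;
-- ported as max 2 (4*n/5).

-- while candidate: if count >= threshold: break; candidate = candidate[:-1]
def shrinkPrefA (strings : List String) (t : Nat) (cand : List Char) : List Char :=
  if h : cand = [] then []
  else if t ≤ strings.countP (fun s => PySem.Chars.startswith s.toList cand) then cand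
  else shrinkPrefA strings t cand.dropLast
termination_by cand.length
decreasing_by
  have hl : 0 < cand.length := List.length_pos_of_ne_nil h
  simp [List.length_dropLast]; omega

def majPrefixA (strings : List String) : String :=
  if strings = [] then ""
  else
    let t := max 2 (4 * strings.length / 5)
    match PySem.List.min? strings PySem.Str.len with
    | none => ""            -- unreachable: strings ≠ []
    | some m =>
      let cand := shrinkPrefA strings t m.toList
      if cand = [] then ""
      else
        let ls := PySem.Chars.rfind cand [' ']
        if 0 ≤ ls then String.ofList (cand.take (ls + 1).toNat) else ""

-- while candidate: if count >= threshold: break; candidate = candidate[1:]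
def shrinkSufA (strings : List String) (t : Nat) (cand : List Char) : List Char :=
  if h : cand = [] then []
  else if t ≤ strings.countP (fun s => PySem.Chars.endswith s.toList cand) then cand
  else shrinkSufA strings t cand.tail
termination_by cand.length
decreasing_by
  have hl : 0 < cand.length := List.length_pos_of_ne_nil h
  simp [List.length_tail]; omega

def majSuffixA (strings : List String) : String :=
  if strings = [] then ""
  else
    let t := max 2 (4 * strings.length / 5)
    match PySem.List.min? strings PySem.Str.len with
    | none => ""            -- unreachable: strings ≠ []
    | some m =>
      let cand := shrinkSufA strings t m.toList
      if cand = [] then ""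
      else
        let fs := PySem.Chars.find cand [' ']
        if 0 ≤ fs then String.ofList (cand.drop (fs + 1).toNat) else ""

def strip_boilerplate_py (summaries : List String) : List String :=
  if summaries.length < 2 then summaries
  else
    let pre := majPrefixA summaries
    let s1 :=
      if 20 ≤ PySem.Str.len pre then
        summaries.map (fun s =>
          if PySem.Chars.startswith s.toList pre.toList then
            String.ofList (PySem.Chars.lstrip (s.toList.drop pre.toList.length))
          else s)
      else summaries
    let suf := majSuffixA s1
    if 20 ≤ PySem.Str.len suf then
      s1.map (fun s =>
        if PySem.Chars.endswith s.toList suf.toList then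
          String.ofList (PySem.Chars.rstrip (s.toList.take (s.toList.length - suf.toList.length)))
        else s)
    else s1

-- ===== PORT B =====
-- _lcp_len: single pass over the two strings
def lcpLenB : List Char → List Char → Nat
  | a :: s, b :: t => if a = b then lcpLenB s t + 1 else 0
  | _, _ => 0

-- _lcs_len(s, t) = _lcp_len(s[::-1], t[::-1])
def lcsLenB (s t : List Char) : Nat := lcpLenB s.reverse t.reverse

-- _select_len: sort ascending, pick the threshold-th largest
def selectLenB (lengths : List Nat) (t : Nat) : Nat :=
  let ls := PySem.List.sorted lengths (fun x => x)
  PySem.List.pyGetD ls ((ls.length : Int) - (t : Int)) 0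

def majPrefixB (summaries : List String) (t : Nat) : String :=
  match PySem.List.min? summaries PySem.Str.len with
  | none => ""              -- unreachable: callers pass a non-empty list
  | some m =>
    let k := selectLenB (summaries.map (fun s => lcpLenB s.toList m.toList)) t
    let cand := m.toList.take k
    let sp := PySem.Chars.rfind cand [' ']
    if 0 ≤ sp then String.ofList (cand.take (sp + 1).toNat) else ""

def majSuffixB (summaries : List String) (t : Nat) : String :=
  match PySem.List.min? summaries PySem.Str.len with
  | none => ""              -- unreachable: callers pass a non-empty list
  | some m =>
    let k := selectLenB (summaries.map (fun s => lcsLenB s.toList m.toList)) t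
    let cand := m.toList.drop (m.toList.length - k)
    let sp := PySem.Chars.find cand [' ']
    if 0 ≤ sp then String.ofList (cand.drop (sp + 1).toNat) else ""

def strip_boilerplate_py_alt (summaries : List String) : List String :=
  if summaries.length < 2 then summaries
  else
    let t := max 2 (4 * summaries.length / 5)   -- int(n*0.8), exact on this range (see port A)
    let pre := majPrefixB summaries t
    let s1 :=
      if 20 ≤ PySem.Str.len pre then
        summaries.map (fun s =>
          if PySem.Chars.startswith s.toList pre.toList then
            String.ofList (PySem.Chars.lstrip (s.toList.drop pre.toList.length))
          else s)
      else summaries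
    let suf := majSuffixB s1 t
    if 20 ≤ PySem.Str.len suf then
      s1.map (fun s =>
        if PySem.Chars.endswith s.toList suf.toList then
          String.ofList (PySem.Chars.rstrip (s.toList.take (s.toList.length - suf.toList.length)))
        else s)
    else s1

-- ===== PRECONDITION & SPEC =====
def Spec_strip_boilerplate_py (summaries : List String) (out : List String) : Prop := out = strip_boilerplate_py_alt summaries
instance (summaries : List String) (out : List String) : Decidable (Spec_strip_boilerplate_py summaries out) := by unfold Spec_strip_boilerplate_py; infer_instance

-- ===== CLAIM (what is proved, stated in full; the proofs are below) =====
def Claim_equal_strip_boilerplate_py : Prop := ∀ (summaries : List String), Dom_strip_boilerplate_py summaries → Spec_strip_boilerplate_py summaries (strip_boilerplate_py summaries)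

-- ===== LEMMAS AND PROOFS =====

theorem lcpLenB_le_right (s m : List Char) : lcpLenB s m ≤ m.length := by
  induction s generalizing m with
  | nil => cases m <;> simp [lcpLenB]
  | cons a s ih =>
    cases m with
    | nil => simp [lcpLenB]
    | cons b t =>
      by_cases h : a = b <;> simp [lcpLenB, h]
      exact ih t

theorem take_prefix_iff_lcp (m s : List Char) (k : Nat) (hk : k ≤ m.length) :
    (m.take k <+: s) ↔ k ≤ lcpLenB s m := by
  induction m generalizing s k with
  | nil =>
    have hk0 : k = 0 := by simpa using hk
    subst hk0; simp
  | cons c m ih =>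
    cases k with
    | zero => simp
    | succ j =>
      cases s with
      | nil => simp [lcpLenB]
      | cons a s =>
        simp only [List.take_succ_cons, List.cons_prefix_cons]
        by_cases h : a = c
        · subst h
          simp [lcpLenB, ih s j (by simpa using hk)]
        · simp [lcpLenB, h, Ne.symm h]

theorem count_startswith_eq (strings : List String) (mL : List Char) (k : Nat) (hk : k ≤ mL.length) :
    strings.countP (fun s => PySem.Chars.startswith s.toList (mL.take k))
      = (strings.map (fun s => lcpLenB s.toList mL)).countP (fun x => decide (k ≤ x)) := by
  rw [List.countP_map]
  apply List.countP_congr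
  intro s _
  simp only [Function.comp]
  rw [Bool.eq_iff_iff]
  simp only [PySem.Chars.startswith_iff, decide_eq_true_iff]
  rw [iff_true]
  exact take_prefix_iff_lcp mL s.toList k hk

theorem count_endswith_eq (strings : List String) (mL : List Char) (k : Nat) (hk : k ≤ mL.length) :
    strings.countP (fun s => PySem.Chars.endswith s.toList (mL.drop (mL.length - k)))
      = (strings.map (fun s => lcsLenB s.toList mL)).countP (fun x => decide (k ≤ x)) := by
  rw [List.countP_map]
  apply List.countP_congr
  intro s _
  simp only [Function.comp, lcsLenB]
  rw [Bool.eq_iff_iff]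
  simp only [PySem.Chars.endswith_iff, decide_eq_true_iff]
  rw [← List.reverse_prefix, List.reverse_drop]
  have h1 : mL.length - (mL.length - k) = k := by omega
  rw [h1]
  rw [iff_true]
  exact take_prefix_iff_lcp mL.reverse s.toList.reverse k (by simpa using hk)

-- selection: r = sorted(lengths)[n - t] is the t-th largest; countP characterisation
theorem selectLenB_spec (lengths : List Nat) (t : Nat) (ht1 : 1 ≤ t) (ht : t ≤ lengths.length) :
    selectLenB lengths t ∈ lengths ∧
    t ≤ lengths.countP (fun x => decide (selectLenB lengths t ≤ x)) ∧
    (∀ k, selectLenB lengths t < k → lengths.countP (fun x => decide (k ≤ x)) < t) := by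
  have hperm := PySem.List.sorted_perm lengths (fun x => x) false
  set ls := PySem.List.sorted lengths (fun x => x) with hls
  have hlen : ls.length = lengths.length := hperm.length_eq
  have hidx : ((ls.length : Int) - (t : Int)) = ((lengths.length - t : Nat) : Int) := by
    rw [hlen]; omega
  have hlt : lengths.length - t < ls.length := by omega
  have hr : selectLenB lengths t = ls[lengths.length - t] := by
    rw [selectLenB, ← hls, hidx, PySem.List.pyGetD_natCast, List.getD_eq_getElem]
  set r := selectLenB lengths t with hrdef
  have hmono : ∀ (p q : Nat) (hpq : p ≤ q) (hq : q < ls.length), ls[p]'(by omega) ≤ ls[q] := by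
    intro p q hpq hq
    have hq' : q < (PySem.List.sorted lengths (fun x => x) false).length := by
      rw [← hls]; exact hq
    exact PySem.List.key_sorted_getElem_mono lengths (fun x => x) hpq hq'
  refine ⟨?_, ?_, ?_⟩
  · rw [hr]; exact hperm.mem_iff.mp (List.getElem_mem hlt)
  · rw [← hperm.countP_eq]
    calc t = (ls.drop (lengths.length - t)).length := by simp [List.length_drop, hlen]; omega
    _ = (ls.drop (lengths.length - t)).countP (fun x => decide (r ≤ x)) := by
          rw [Eq.comm, List.countP_eq_length]
          intro a ha
          rw [List.mem_iff_getElem] at ha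
          obtain ⟨i, hi, rfl⟩ := ha
          rw [List.getElem_drop]
          simp only [decide_eq_true_iff]
          rw [hr]
          exact hmono _ _ (by omega) (by simp only [List.length_drop] at hi; omega)
    _ ≤ ls.countP (fun x => decide (r ≤ x)) := by
          conv_rhs => rw [← List.take_append_drop (lengths.length - t) ls]
          rw [List.countP_append]; omega
  · intro k hk
    rw [← hperm.countP_eq]
    conv_lhs => rw [← List.take_append_drop (lengths.length - t + 1) ls]
    rw [List.countP_append]
    have h1 : (ls.take (lengths.length - t + 1)).countP (fun x => decide (k ≤ x)) = 0 := by
      rw [List.countP_eq_zero]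
      intro a ha
      rw [List.mem_iff_getElem] at ha
      obtain ⟨i, hi, rfl⟩ := ha
      rw [List.getElem_take]
      simp only [decide_eq_true_iff]
      have hi' : i ≤ lengths.length - t := by
        simp only [List.length_take] at hi; omega
      have := hmono i (lengths.length - t) hi' hlt
      rw [← hr] at this
      omega
    have h2 : (ls.drop (lengths.length - t + 1)).countP (fun x => decide (k ≤ x))
        ≤ t - 1 := by
      calc _ ≤ (ls.drop (lengths.length - t + 1)).length := List.countP_le_length
      _ ≤ t - 1 := by simp [List.length_drop, hlen]; omega
    omega

theorem take_succ_dropLast (mL : List Char) (j : Nat) (h : j + 1 ≤ mL.length) :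
    (mL.take (j + 1)).dropLast = mL.take j := by
  rw [List.dropLast_eq_take, List.length_take, List.take_take]
  congr 1
  omega

-- the A-side shrink loop lands exactly on the t-th largest common-prefix length
theorem shrinkPrefA_eq (strings : List String) (t : Nat) (mL : List Char) (r j : Nat)
    (hj : j ≤ mL.length) (hrj : r ≤ j)
    (hr : t ≤ strings.countP (fun s => PySem.Chars.startswith s.toList (mL.take r)))
    (hmax : ∀ k, r < k → k ≤ mL.length →
      strings.countP (fun s => PySem.Chars.startswith s.toList (mL.take k)) < t) :
    shrinkPrefA strings t (mL.take j) = mL.take r := by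
  induction j with
  | zero =>
    have hr0 : r = 0 := by omega
    subst hr0
    rw [shrinkPrefA]; simp
  | succ j ih =>
    have hne : mL.take (j + 1) ≠ [] := by
      intro h
      rcases List.take_eq_nil_iff.mp h with h' | h'
      · omega
      · subst h'; simp at hj
    rw [shrinkPrefA, dif_neg hne]
    by_cases hc : t ≤ strings.countP (fun s => PySem.Chars.startswith s.toList (mL.take (j + 1)))
    · rw [if_pos hc]
      have : r = j + 1 := by
        by_contra hne'
        exact absurd hc (by simpa using hmax (j + 1) (by omega) hj)
      rw [this]
    · rw [if_neg hc, take_succ_dropLast mL j hj]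
      have hrj' : r ≤ j := by
        rcases Nat.lt_or_ge r (j + 1) with h | h
        · omega
        · exact absurd hr (by rw [show r = j + 1 by omega] at hr ⊢; exact fun _ => hc hr)
      exact ih (by omega) hrj'

theorem drop_sub_succ_tail (mL : List Char) (j : Nat) (h : j + 1 ≤ mL.length) :
    (mL.drop (mL.length - (j + 1))).tail = mL.drop (mL.length - j) := by
  rw [List.tail_drop]
  congr 1
  omega

theorem shrinkSufA_eq (strings : List String) (t : Nat) (mL : List Char) (r j : Nat)
    (hj : j ≤ mL.length) (hrj : r ≤ j)
    (hr : t ≤ strings.countP (fun s => PySem.Chars.endswith s.toList (mL.drop (mL.length - r))))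
    (hmax : ∀ k, r < k → k ≤ mL.length →
      strings.countP (fun s => PySem.Chars.endswith s.toList (mL.drop (mL.length - k))) < t) :
    shrinkSufA strings t (mL.drop (mL.length - j)) = mL.drop (mL.length - r) := by
  induction j with
  | zero =>
    have hr0 : r = 0 := by omega
    subst hr0
    rw [shrinkSufA]; simp
  | succ j ih =>
    have hne : mL.drop (mL.length - (j + 1)) ≠ [] := by
      rw [Ne, List.drop_eq_nil_iff]; omega
    rw [shrinkSufA, dif_neg hne]
    by_cases hc : t ≤ strings.countP (fun s => PySem.Chars.endswith s.toList (mL.drop (mL.length - (j + 1))))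
    · rw [if_pos hc]
      have : r = j + 1 := by
        by_contra hne'
        exact absurd hc (by simpa using hmax (j + 1) (by omega) hj)
      rw [this]
    · rw [if_neg hc, drop_sub_succ_tail mL j hj]
      have hrj' : r ≤ j := by
        rcases Nat.lt_or_ge r (j + 1) with h | h
        · omega
        · exact absurd hr (by rw [show r = j + 1 by omega] at hr ⊢; exact fun _ => hc hr)
      exact ih (by omega) hrj'

theorem threshold_le (n : Nat) (h2 : 2 ≤ n) : max 2 (4 * n / 5) ≤ n := by omega

theorem majPrefix_eq (strings : List String) (h2 : 2 ≤ strings.length) :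
    majPrefixA strings = majPrefixB strings (max 2 (4 * strings.length / 5)) := by
  have hne : strings ≠ [] := by intro h; subst h; simp at h2
  cases hm : PySem.List.min? strings PySem.Str.len with
  | none => exact absurd ((PySem.List.min?_eq_none_iff strings PySem.Str.len).mp hm) hne
  | some m =>
    rw [majPrefixA, majPrefixB, if_neg hne, hm]
    simp only
    set t := max 2 (4 * strings.length / 5) with htdef
    set mL := m.toList with hmLdef
    set Ls := strings.map (fun s => lcpLenB s.toList mL) with hLsdef
    have hLslen : Ls.length = strings.length := List.length_map ..
    have ht1 : 1 ≤ t := by omega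
    have htn : t ≤ Ls.length := by rw [hLslen]; exact threshold_le _ h2
    obtain ⟨hmem, hcnt, hmax⟩ := selectLenB_spec Ls t ht1 htn
    set r := selectLenB Ls t with hrdef
    have hrm : r ≤ mL.length := by
      rw [hLsdef, List.mem_map] at hmem
      obtain ⟨s, -, hs⟩ := hmem
      rw [← hs]; exact lcpLenB_le_right _ _
    have hshr : shrinkPrefA strings t mL = mL.take r := by
      conv_lhs => rw [← List.take_length (l := mL)]
      exact shrinkPrefA_eq strings t mL r mL.length le_rfl hrm
        (by rw [count_startswith_eq strings mL r hrm]; exact hcnt)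
        (fun k hk hkm => by rw [count_startswith_eq strings mL k hkm]; exact hmax k hk)
    rw [hshr]
    by_cases hc : mL.take r = []
    · rw [if_pos hc, hc]
      have : PySem.Chars.rfind ([] : List Char) [' '] = -1 := by decide
      rw [this]
      norm_num
    · rw [if_neg hc]

theorem majSuffix_eq (strings : List String) (h2 : 2 ≤ strings.length) :
    majSuffixA strings = majSuffixB strings (max 2 (4 * strings.length / 5)) := by
  have hne : strings ≠ [] := by intro h; subst h; simp at h2
  cases hm : PySem.List.min? strings PySem.Str.len with
  | none => exact absurd ((PySem.List.min?_eq_none_iff strings PySem.Str.len).mp hm) hne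
  | some m =>
    rw [majSuffixA, majSuffixB, if_neg hne, hm]
    simp only
    set t := max 2 (4 * strings.length / 5) with htdef
    set mL := m.toList with hmLdef
    set Ls := strings.map (fun s => lcsLenB s.toList mL) with hLsdef
    have hLslen : Ls.length = strings.length := List.length_map ..
    have ht1 : 1 ≤ t := by omega
    have htn : t ≤ Ls.length := by rw [hLslen]; exact threshold_le _ h2
    obtain ⟨hmem, hcnt, hmax⟩ := selectLenB_spec Ls t ht1 htn
    set r := selectLenB Ls t with hrdef
    have hrm : r ≤ mL.length := by
      rw [hLsdef, List.mem_map] at hmem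
      obtain ⟨s, -, hs⟩ := hmem
      rw [← hs, lcsLenB]
      simpa using lcpLenB_le_right s.toList.reverse mL.reverse
    have hshr : shrinkSufA strings t mL = mL.drop (mL.length - r) := by
      conv_lhs => rw [show mL = mL.drop (mL.length - mL.length) by simp]
      exact shrinkSufA_eq strings t mL r mL.length le_rfl hrm
        (by rw [count_endswith_eq strings mL r hrm]; exact hcnt)
        (fun k hk hkm => by rw [count_endswith_eq strings mL k hkm]; exact hmax k hk)
    rw [hshr]
    by_cases hc : mL.drop (mL.length - r) = []
    · rw [if_pos hc, hc]
      have : PySem.Chars.find ([] : List Char) [' '] = -1 := by decide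
      rw [this]
      norm_num
    · rw [if_neg hc]

-- ===== VERDICT (by name: the statement is the Claim_ definition above) =====
theorem strip_boilerplate_py_spec : Claim_equal_strip_boilerplate_py := by
  intro summaries _
  unfold Spec_strip_boilerplate_py strip_boilerplate_py strip_boilerplate_py_alt
  by_cases h2 : summaries.length < 2
  · simp [h2]
  · have h2' : 2 ≤ summaries.length := by omega
    simp only [if_neg h2]
    rw [majPrefix_eq summaries h2']
    set pre := majPrefixB summaries (max 2 (4 * summaries.length / 5)) with hpre
    by_cases hp : 20 ≤ PySem.Str.len pre
    · simp only [if_pos hp]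
      rw [majSuffix_eq _ (by simpa using h2'), List.length_map]
    · simp only [if_neg hp]
      rw [majSuffix_eq _ h2']
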